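-- pv_equiv track=rewrite | github.com/Bua9595/Bewerbungsagent | job_collector.py | _pick_email
-- ===== SOURCE A (Python) =====
-- from typing import List, Tuple
--
-- _EMAIL_HINTS = ("bewerbung", "recruit", "hr", "jobs", "career")
--
-- def _pick_email(candidates: List[str]) -> str:
--     if not candidates:
--         return ""
--     for hint in _EMAIL_HINTS:
--         for email in candidates:
--             if hint in email.lower():
--                 return email
--     return candidates[0]
-- ===== SOURCE B (Python) =====
-- from typing import List
--
-- _EMAIL_HINTS = ("bewerbung", "recruit", "hr", "jobs", "career")
--
-- def _rank(email: str) -> int: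
--     low = email.lower()
--     for i, hint in enumerate(_EMAIL_HINTS):
--         if hint in low:
--             return i
--     return len(_EMAIL_HINTS)
--
-- def _pick_email(candidates: List[str]) -> str:
--     if not candidates:
--         return ""
--     return min(candidates, key=_rank)
-- ===== Notes on version B (the rewrite author's own statement) =====
-- stated objective: simpler
-- what changed: Replaces the hint-outer/candidate-inner nested scan with a single keyed pass: each candidate gets a rank (index of its first matching hint, or len(_EMAIL_HINTS)) and min(candidates, key=_rank) returns the first candidate of minimal rank.
import Mathlib
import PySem

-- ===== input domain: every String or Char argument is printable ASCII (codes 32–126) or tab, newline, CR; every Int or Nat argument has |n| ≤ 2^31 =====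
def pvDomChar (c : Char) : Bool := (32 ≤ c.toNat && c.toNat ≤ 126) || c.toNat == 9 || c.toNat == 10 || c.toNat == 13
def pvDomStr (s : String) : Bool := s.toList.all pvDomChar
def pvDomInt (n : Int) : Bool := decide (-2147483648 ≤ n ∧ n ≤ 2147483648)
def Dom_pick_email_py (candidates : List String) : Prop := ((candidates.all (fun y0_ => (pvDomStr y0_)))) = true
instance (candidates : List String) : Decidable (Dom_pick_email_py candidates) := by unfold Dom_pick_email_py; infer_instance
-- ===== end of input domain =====

-- B replaces A's hint-outer/candidate-inner nested scan by one keyed pass (rank = first matching hint index, then min by rank); objective: simpler.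


def pvHints : List String := ["bewerbung", "recruit", "hr", "jobs", "career"]

-- 'hint in email.lower()'
def pvMatches (hint email : String) : Bool := PySem.Str.isIn hint (PySem.Str.lower email)

-- ===== PORT A =====
-- outer loop over hints, inner loop over candidates, first hit returned
def pick_email_py (candidates : List String) : String :=
  if candidates.isEmpty then ""
  else
    match pvHints.findSome? (fun hint => candidates.find? (fun email => pvMatches hint email)) with
    | some e => e
    | none => candidates.headD ""

-- ===== PORT B =====
-- rank of an email: index of the first hint contained in its lowercase form, else len(hints)
def pvRank (email : String) : Nat :=
  match pvHints.findIdx? (fun hint => pvMatches hint email) with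
  | some i => i
  | none => pvHints.length

def pick_email_py_alt (candidates : List String) : String :=
  if candidates.isEmpty then ""
  else (PySem.List.min? candidates pvRank).getD ""

-- ===== PRECONDITION & SPEC =====
def Spec_pick_email_py (candidates : List String) (out : String) : Prop := out = pick_email_py_alt candidates
instance (candidates : List String) (out : String) : Decidable (Spec_pick_email_py candidates out) := by unfold Spec_pick_email_py; infer_instance

-- ===== CLAIM (what is proved, stated in full; the proofs are below) =====
def Claim_equal_pick_email_py : Prop := ∀ (candidates : List String), Dom_pick_email_py candidates → Spec_pick_email_py candidates (pick_email_py candidates)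

-- ===== LEMMAS AND PROOFS =====

-- the min?-foldl with accumulator `some a` returns the first element of minimal key of a :: t
theorem pv_foldl_min_first {α : Type} (key : α → Nat) :
    ∀ (t : List α) (a : α) (i : Nat) (hi : i < (a :: t).length),
      (∀ y ∈ a :: t, key ((a :: t)[i]) ≤ key y) →
      (∀ j (hj : j < i), key ((a :: t)[i]) < key ((a :: t)[j]'(by omega))) →
      List.foldl (fun acc x => match acc with
        | none => some x
        | some m => if key x < key m then some x else some m) (some a) t = some ((a :: t)[i]) := by
  intro t
  induction t with
  | nil =>
    intro a i hi hmin hbef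
    have h0 : i = 0 := by simpa using hi
    subst h0
    rfl
  | cons x t ih =>
    intro a i hi hmin hbef
    show List.foldl _ (if key x < key a then some x else some a) t = _
    match i with
    | 0 =>
      have hxa : ¬ key x < key a := by
        have := hmin x (by simp)
        simp only [List.getElem_cons_zero] at this
        omega
      rw [if_neg hxa]
      have := ih a 0 (by simp)
        (by intro y hy
            simp only [List.getElem_cons_zero]
            exact hmin y (by simp only [List.mem_cons] at hy ⊢; tauto))
        (by intro j hj; omega)
      simpa using this
    | 1 =>
      have hxa : key x < key a := by simpa using hbef 0 (by omega)
      rw [if_pos hxa]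
      have := ih x 0 (by simp)
        (by intro y hy
            simp only [List.getElem_cons_zero]
            have : y ∈ a :: x :: t := by simp only [List.mem_cons] at hy ⊢; tauto
            simpa using hmin y this)
        (by intro j hj; omega)
      simpa using this
    | (j+2) =>
      have hj2 : j < t.length := by simpa using hi
      have hma : key (t[j]) < key a := by simpa using hbef 0 (by omega)
      have hmx : key (t[j]) < key x := by simpa using hbef 1 (by omega)
      have hminT : ∀ y ∈ t, key (t[j]) ≤ key y := by
        intro y hy
        have : y ∈ a :: x :: t := by simp [hy]
        simpa using hmin y this
      have hbefT : ∀ l (hl : l < j), key (t[j]) < key (t[l]'(by omega)) := by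
        intro l hl
        have := hbef (l+2) (by omega)
        simpa using this
      by_cases hxa : key x < key a
      · rw [if_pos hxa]
        have := ih x (j+1) (by simpa using hj2)
          (by intro y hy
              simp only [List.getElem_cons_succ]
              simp only [List.mem_cons] at hy
              rcases hy with rfl | hy
              · exact Nat.le_of_lt hmx
              · exact hminT y hy)
          (by intro jj hjj
              match jj with
              | 0 => simpa using hmx
              | (l+1) =>
                simp only [List.getElem_cons_succ]
                exact hbefT l (by omega))
        simpa using this
      · rw [if_neg hxa]
        have := ih a (j+1) (by simpa using hj2)
          (by intro y hy
              simp only [List.getElem_cons_succ]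
              simp only [List.mem_cons] at hy
              rcases hy with rfl | hy
              · exact Nat.le_of_lt hma
              · exact hminT y hy)
          (by intro jj hjj
              match jj with
              | 0 => simpa using hma
              | (l+1) =>
                simp only [List.getElem_cons_succ]
                exact hbefT l (by omega))
        simpa using this

-- min? returns the FIRST element of minimal key
theorem pv_min?_first {α : Type} (key : α → Nat) (c : α) (t : List α) (i : Nat)
    (hi : i < (c :: t).length)
    (hmin : ∀ y ∈ c :: t, key ((c :: t)[i]) ≤ key y)
    (hbef : ∀ j (hj : j < i), key ((c :: t)[i]) < key ((c :: t)[j]'(by omega))) :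
    PySem.List.min? (c :: t) key = some ((c :: t)[i]) := by
  show List.foldl _ (some c) t = _
  exact pv_foldl_min_first key t c i hi hmin hbef

-- find? = some e gives index, match, and no earlier match
theorem pv_find?_some {α : Type} (p : α → Bool) :
    ∀ (cs : List α) (e : α), cs.find? p = some e →
      ∃ k, ∃ hk : k < cs.length, cs[k] = e ∧ p e = true ∧
        ∀ j (hj : j < k), p (cs[j]'(by omega)) = false := by
  intro cs
  induction cs with
  | nil => intro e h; simp at h
  | cons x t ih =>
    intro e h
    by_cases hx : p x = true
    · rw [List.find?_cons_of_pos hx] at h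
      cases h
      exact ⟨0, by simp, rfl, hx, by intro j hj; omega⟩
    · rw [List.find?_cons_of_neg hx] at h
      obtain ⟨k, hk, he, hpe, hbef⟩ := ih e h
      refine ⟨k+1, by simpa using Nat.succ_lt_succ hk, by simpa using he, hpe, ?_⟩
      intro j hj
      match j with
      | 0 => simpa using Bool.eq_false_iff.mpr hx
      | (j'+1) => simpa using hbef j' (by omega)

-- find? = none gives no match
theorem pv_find?_none {α : Type} (p : α → Bool) (cs : List α) (h : cs.find? p = none) :
    ∀ y ∈ cs, p y = false := by
  intro y hy
  have := List.find?_eq_none.mp h y hy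
  simpa using this

-- findSome? = some e gives index and no earlier hit
theorem pv_findSome?_some {α β : Type} (f : α → Option β) :
    ∀ (hs : List α) (e : β), hs.findSome? f = some e →
      ∃ i, ∃ hi : i < hs.length, f hs[i] = some e ∧
        ∀ j (hj : j < i), f (hs[j]'(by omega)) = none := by
  intro hs
  induction hs with
  | nil => intro e h; simp at h
  | cons x t ih =>
    intro e h
    rw [List.findSome?_cons] at h
    cases hx : f x with
    | some v =>
      rw [hx] at h
      exact ⟨0, by simp, by simp [hx, h], by intro j hj; omega⟩
    | none =>
      rw [hx] at h
      obtain ⟨i, hi, he, hbef⟩ := ih e h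
      refine ⟨i+1, by simpa using Nat.succ_lt_succ hi, by simpa using he, ?_⟩
      intro j hj
      match j with
      | 0 => simpa using hx
      | (j'+1) => simpa using hbef j' (by omega)

theorem pv_findSome?_none {α β : Type} (f : α → Option β) (hs : List α)
    (h : hs.findSome? f = none) : ∀ x ∈ hs, f x = none := by
  intro x hx
  exact List.findSome?_eq_none_iff.mp h x hx

-- rank characterizations
theorem pv_rank_eq_of (e : String) (i : Nat) (hi : i < pvHints.length)
    (hmatch : pvMatches pvHints[i] e = true)
    (hbef : ∀ j (hj : j < i), pvMatches (pvHints[j]'(by omega)) e = false) :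
    pvRank e = i := by
  unfold pvRank
  have hf : pvHints.findIdx? (fun hint => pvMatches hint e) = some i := by
    rw [List.findIdx?_eq_some_iff_getElem]
    exact ⟨hi, hmatch, by intro j hj; simpa using hbef j hj⟩
  rw [hf]

theorem pv_rank_ge (e : String) (i : Nat) (hi : i < pvHints.length)
    (h : ∀ j (_hj : j < i) (hj2 : j < pvHints.length), pvMatches pvHints[j] e = false) :
    i ≤ pvRank e := by
  unfold pvRank
  cases hf : pvHints.findIdx? (fun hint => pvMatches hint e) with
  | none => show i ≤ pvHints.length; omega
  | some k =>
    show i ≤ k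
    rw [List.findIdx?_eq_some_iff_getElem] at hf
    obtain ⟨hk, hm, _⟩ := hf
    by_contra hlt
    have hbad := h k (by omega) hk
    rw [hbad] at hm
    exact absurd hm (by simp)

theorem pv_rank_all (e : String)
    (h : ∀ j (hj : j < pvHints.length), pvMatches pvHints[j] e = false) :
    pvRank e = pvHints.length := by
  unfold pvRank
  have hf : pvHints.findIdx? (fun hint => pvMatches hint e) = none := by
    rw [List.findIdx?_eq_none_iff]
    intro x hx
    obtain ⟨j, hj, rfl⟩ := List.mem_iff_getElem.mp hx
    simp [h j hj]
  rw [hf]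

theorem pv_rank_matches (e : String) (i : Nat) (hi : i < pvHints.length)
    (h : pvRank e = i) : pvMatches pvHints[i] e = true := by
  unfold pvRank at h
  cases hf : pvHints.findIdx? (fun hint => pvMatches hint e) with
  | none =>
    rw [hf] at h
    have : pvHints.length = i := h
    omega
  | some k =>
    rw [hf] at h
    have hk : k = i := h
    subst hk
    rw [List.findIdx?_eq_some_iff_getElem] at hf
    obtain ⟨hklen, hm, _⟩ := hf
    simpa using hm

-- ===== VERDICT (by name: the statement is the Claim_ definition above) =====
theorem pick_email_py_spec : Claim_equal_pick_email_py := by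
  intro cs _
  unfold Spec_pick_email_py pick_email_py pick_email_py_alt
  by_cases hemp : cs.isEmpty
  · simp [hemp]
  · simp only [if_neg hemp]
    have hne : cs ≠ [] := by simpa [List.isEmpty_iff] using hemp
    obtain ⟨c, t, rfl⟩ : ∃ c t, cs = c :: t := by
      cases cs with
      | nil => exact absurd rfl hne
      | cons c t => exact ⟨c, t, rfl⟩
    cases hA : pvHints.findSome? (fun hint => (c :: t).find? (fun email => pvMatches hint email)) with
    | some e =>
      obtain ⟨i, hi, hfi, hbefHints⟩ := pv_findSome?_some _ pvHints e hA
      obtain ⟨k, hk, hek, hpe, hbefCs⟩ := pv_find?_some _ (c :: t) e hfi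
      have hnoEarlier : ∀ y ∈ c :: t, ∀ j (hj : j < i) (hj2 : j < pvHints.length),
          pvMatches pvHints[j] y = false := by
        intro y hy j hj hj2
        have := pv_find?_none _ (c :: t) (by simpa using hbefHints j hj) y hy
        simpa using this
      have hre : pvRank e = i := by
        apply pv_rank_eq_of e i hi (by simpa using hpe)
        intro j hj
        exact hnoEarlier e (hek ▸ (List.getElem_mem hk)) j hj (by omega)
      have hmin : ∀ y ∈ c :: t, pvRank e ≤ pvRank y := by
        intro y hy
        rw [hre]
        exact pv_rank_ge y i hi (fun j hj hj2 => hnoEarlier y hy j hj hj2)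
      have hstrict : ∀ j (hj : j < k), pvRank e < pvRank ((c :: t)[j]'(by omega)) := by
        intro j hj
        have hjlen : j < (c :: t).length := by omega
        have hjm : (c :: t)[j] ∈ c :: t := List.getElem_mem hjlen
        have hle := hmin _ hjm
        rcases Nat.lt_or_ge (pvRank e) (pvRank ((c :: t)[j]'hjlen)) with hcase | hcase
        · exact hcase
        · exfalso
          have heq : pvRank ((c :: t)[j]'hjlen) = i := by omega
          have hmatchj := pv_rank_matches _ i hi heq
          have hfalse := hbefCs j hj
          simp only at hfalse
          rw [hfalse] at hmatchj
          exact absurd hmatchj (by simp)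
      have hres := pv_min?_first pvRank c t k hk
        (by intro y hy; rw [hek]; exact hmin y hy)
        (by intro j hj; rw [hek]; exact hstrict j hj)
      rw [hek] at hres
      rw [hres]
      rfl
    | none =>
      have hall : ∀ y ∈ c :: t, pvRank y = pvHints.length := by
        intro y hy
        apply pv_rank_all
        intro j hj
        have hnone := pv_findSome?_none _ pvHints hA pvHints[j] (List.getElem_mem hj)
        have := pv_find?_none _ (c :: t) (by simpa using hnone) y hy
        simpa using this
      have hres := pv_min?_first pvRank c t 0 (by simp)
        (by intro y hy
            simp only [List.getElem_cons_zero]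
            rw [hall c List.mem_cons_self, hall y hy])
        (by intro j hj; omega)
      simp only [List.getElem_cons_zero] at hres
      rw [hres]
      rfl
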